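-- pv_equiv track=rewrite | github.com/TGosselink/Shadowbroker | backend/auth.py | _scope_allows_exact
-- ===== SOURCE A (Python) =====
-- def _scope_allows_exact(required_scopes: set[str], allowed_scopes: list[str]) -> bool:
--     for scope in allowed_scopes:
--         normalized = str(scope or "").strip()
--         if not normalized:
--             continue
--         if normalized == "*" or normalized in required_scopes:
--             return True
--     return False
-- ===== SOURCE B (Python) =====
-- def _scope_allows_exact(required_scopes, allowed_scopes):
--     # Sort-then-merge: sort the distinct non-empty normalized allowed scopes and
--     # the required scopes (plus the wildcard "*"), then detect a common element
--     # with a two-pointer merge scan instead of per-element membership tests.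
--     xs = sorted({n for s in allowed_scopes if (n := str(s or "").strip())})
--     ys = sorted(set(required_scopes) | {"*"})
--     i = j = 0
--     while i < len(xs) and j < len(ys):
--         if xs[i] == ys[j]:
--             return True
--         if xs[i] < ys[j]:
--             i += 1
--         else:
--             j += 1
--     return False
-- ===== Notes on version B (the rewrite author's own statement) =====
-- stated objective: alternative
-- what changed: Replaces A's single scan with continue/early-return and per-element membership tests by a sort-then-merge algorithm: sort the distinct non-empty normalized allowed scopes and the required scopes plus the wildcard, then detect a common element with a two-pointer merge scan.
import Mathlib
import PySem

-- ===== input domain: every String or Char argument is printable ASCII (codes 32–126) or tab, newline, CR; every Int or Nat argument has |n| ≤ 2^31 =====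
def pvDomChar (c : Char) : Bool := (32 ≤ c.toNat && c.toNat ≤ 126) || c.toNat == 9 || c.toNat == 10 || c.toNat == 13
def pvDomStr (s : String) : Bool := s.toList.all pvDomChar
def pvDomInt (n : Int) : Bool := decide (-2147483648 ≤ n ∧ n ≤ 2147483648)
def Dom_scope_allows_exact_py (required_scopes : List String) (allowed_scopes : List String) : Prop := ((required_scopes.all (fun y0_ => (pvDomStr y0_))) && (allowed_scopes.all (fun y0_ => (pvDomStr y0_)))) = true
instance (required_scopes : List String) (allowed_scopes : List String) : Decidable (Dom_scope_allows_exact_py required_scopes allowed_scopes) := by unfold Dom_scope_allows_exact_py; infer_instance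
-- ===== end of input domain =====

-- B replaces A's scan-with-early-return by sorting both sides and detecting a common
-- element with a two-pointer merge (objective: alternative algorithm, not faster).

-- ===== PORT A =====
-- literal port of A: loop over allowed_scopes with continue / early return
def scope_allows_exact_py (required_scopes : List String) (allowed_scopes : List String) : Bool :=
  match allowed_scopes with
  | [] => false
  | scope :: rest =>
    let normalized := PySem.Str.strip (if scope == "" then "" else scope)  -- str(scope or "").strip()
    if normalized == "" then scope_allows_exact_py required_scopes rest
    else if normalized == "*" || required_scopes.contains normalized then true
    else scope_allows_exact_py required_scopes rest

-- ===== PORT B =====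
-- the two-pointer merge scan over two sorted lists (Source B's while loop)
def pvMerge : List String → List String → Bool
  | [], _ => false
  | _ :: _, [] => false
  | x :: xs, y :: ys =>
    if x == y then true
    else if x < y then pvMerge xs (y :: ys)
    else pvMerge (x :: xs) ys

-- port of B: sort the distinct non-empty normalized allowed scopes and the
-- required scopes plus "*", then merge-scan for a common element
def scope_allows_exact_py_alt (required_scopes : List String) (allowed_scopes : List String) : Bool :=
  let xs := PySem.List.sorted (allowed_scopes.foldl (fun (acc : PySem.Set String) s =>
      let n := PySem.Str.strip (if s == "" then "" else s)
      if n == "" then acc else PySem.Set.add acc n) PySem.Set.empty) (fun x => x) false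
  let ys := PySem.List.sorted (PySem.Set.union (PySem.Set.ofList required_scopes) ["*"]) (fun x => x) false
  pvMerge xs ys

-- ===== PRECONDITION & SPEC =====
def Spec_scope_allows_exact_py (required_scopes : List String) (allowed_scopes : List String) (out : Bool) : Prop := out = scope_allows_exact_py_alt required_scopes allowed_scopes
instance (required_scopes : List String) (allowed_scopes : List String) (out : Bool) : Decidable (Spec_scope_allows_exact_py required_scopes allowed_scopes out) := by unfold Spec_scope_allows_exact_py; infer_instance

-- ===== CLAIM =====
def Claim_equal_scope_allows_exact_py : Prop := ∀ (required_scopes : List String) (allowed_scopes : List String), Dom_scope_allows_exact_py required_scopes allowed_scopes → Spec_scope_allows_exact_py required_scopes allowed_scopes (scope_allows_exact_py required_scopes allowed_scopes)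

-- ===== LEMMAS AND PROOFS =====

theorem pv_orEmpty (s : String) : (if s == "" then "" else s) = s := by
  split_ifs with h
  · exact (show s = "" by simpa using h).symm
  · rfl

-- characterization of port A: true iff some scope normalizes to a non-empty hit
theorem pvA_char (req alw : List String) :
    scope_allows_exact_py req alw = true ↔
      ∃ s ∈ alw, PySem.Str.strip s ≠ "" ∧
        (PySem.Str.strip s = "*" ∨ PySem.Str.strip s ∈ req) := by
  induction alw with
  | nil => simp [scope_allows_exact_py]
  | cons a rest ih =>
    simp only [scope_allows_exact_py, pv_orEmpty]
    by_cases h1 : (PySem.Str.strip a == "") = true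
    · have h1' : PySem.Str.strip a = "" := by simpa using h1
      rw [if_pos h1, ih]
      constructor
      · rintro ⟨s, hs, h⟩; exact ⟨s, List.mem_cons_of_mem _ hs, h⟩
      · rintro ⟨s, hs, hne, hh⟩
        rcases List.mem_cons.mp hs with h2 | h2
        · subst h2; exact absurd h1' hne
        · exact ⟨s, h2, hne, hh⟩
    · have h1' : PySem.Str.strip a ≠ "" := by simpa using h1
      rw [if_neg h1]
      by_cases h2 : (PySem.Str.strip a == "*" || req.contains (PySem.Str.strip a)) = true
      · rw [if_pos h2]
        constructor
        · intro _
          refine ⟨a, by simp, h1', ?_⟩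
          rcases Bool.or_eq_true_iff.mp h2 with h | h
          · exact Or.inl (by simpa using h)
          · exact Or.inr (by simpa using h)
        · intro _; rfl
      · rw [if_neg h2, ih]
        constructor
        · rintro ⟨s, hs, h⟩; exact ⟨s, List.mem_cons_of_mem _ hs, h⟩
        · rintro ⟨s, hs, hne, hh⟩
          rcases List.mem_cons.mp hs with h3 | h3
          · subst h3
            exfalso; apply h2
            apply Bool.or_eq_true_iff.mpr
            rcases hh with h | h
            · exact Or.inl (by simpa using h)
            · exact Or.inr (by simpa using h)
          · exact ⟨s, h3, hne, hh⟩

theorem pvStep_eq :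
    (fun (acc : PySem.Set String) s =>
        let n := PySem.Str.strip (if s == "" then "" else s)
        if n == "" then acc else PySem.Set.add acc n) =
    (fun (acc : PySem.Set String) s =>
        if PySem.Str.strip s == "" then acc else PySem.Set.add acc (PySem.Str.strip s)) := by
  funext acc s
  simp only [pv_orEmpty]

-- membership in B's accumulated set of normalized scopes
theorem pvB_mem (alw : List String) (acc : PySem.Set String) (x : String) :
    x ∈ alw.foldl (fun (acc : PySem.Set String) s =>
        if PySem.Str.strip s == "" then acc else PySem.Set.add acc (PySem.Str.strip s)) acc ↔
      x ∈ acc ∨ ∃ s ∈ alw, PySem.Str.strip s = x ∧ x ≠ "" := by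
  induction alw generalizing acc with
  | nil => simp
  | cons a rest ih =>
    simp only [List.foldl_cons]
    by_cases h1 : (PySem.Str.strip a == "") = true
    · have h1' : PySem.Str.strip a = "" := by simpa using h1
      rw [if_pos h1, ih]
      constructor
      · rintro (h | ⟨s, hs, hx⟩)
        · exact Or.inl h
        · exact Or.inr ⟨s, List.mem_cons_of_mem _ hs, hx⟩
      · rintro (h | ⟨s, hs, heq, hne⟩)
        · exact Or.inl h
        · rcases List.mem_cons.mp hs with h2 | h2
          · subst h2; exact absurd (heq.symm.trans h1') hne
          · exact Or.inr ⟨s, h2, heq, hne⟩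
    · have h1' : PySem.Str.strip a ≠ "" := by simpa using h1
      rw [if_neg h1, ih]
      constructor
      · rintro (h | ⟨s, hs, hx⟩)
        · rcases (PySem.Set.mem_add (s := acc) (x := PySem.Str.strip a) (y := x)).mp h with h2 | h2
          · exact Or.inl h2
          · exact Or.inr ⟨a, by simp, h2.symm, fun he => h1' (h2 ▸ he)⟩
        · exact Or.inr ⟨s, List.mem_cons_of_mem _ hs, hx⟩
      · rintro (h | ⟨s, hs, heq, hne⟩)
        · exact Or.inl ((PySem.Set.mem_add (s := acc) (x := PySem.Str.strip a) (y := x)).mpr (Or.inl h))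
        · rcases List.mem_cons.mp hs with h2 | h2
          · exact Or.inl ((PySem.Set.mem_add (s := acc) (x := PySem.Str.strip a) (y := x)).mpr (Or.inr (h2 ▸ heq).symm))
          · exact Or.inr ⟨s, h2, heq, hne⟩

-- correctness of the merge scan on sorted lists
theorem pvMerge_iff (xs ys : List String)
    (hx : xs.Pairwise (· ≤ ·)) (hy : ys.Pairwise (· ≤ ·)) :
    pvMerge xs ys = true ↔ ∃ c, c ∈ xs ∧ c ∈ ys := by
  induction xs, ys using pvMerge.induct with
  | case1 ys => simp [pvMerge]
  | case2 x xs => simp [pvMerge]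
  | case3 x xs y ys heq =>
    have hxy : x = y := by simpa using heq
    subst hxy
    simp only [pvMerge, if_pos heq]
    exact ⟨fun _ => ⟨x, by simp, by simp⟩, fun _ => by simp⟩
  | case4 x xs y ys heq hlt ih =>
    simp only [pvMerge, if_neg heq, if_pos hlt]
    rw [ih (List.Pairwise.sublist (List.sublist_cons_self x xs) hx) hy]
    constructor
    · rintro ⟨c, hc1, hc2⟩; exact ⟨c, List.mem_cons_of_mem _ hc1, hc2⟩
    · rintro ⟨c, hc1, hc2⟩
      rcases List.mem_cons.mp hc1 with h | h
      · subst h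
        have hyc : y ≤ c := by
          rcases List.mem_cons.mp hc2 with h2 | h2
          · exact le_of_eq h2.symm
          · exact (List.pairwise_cons.mp hy).1 c h2
        exact absurd (lt_of_lt_of_le hlt hyc) (lt_irrefl c)
      · exact ⟨c, h, hc2⟩
  | case5 x xs y ys heq hlt ih =>
    have hyx : y < x := by
      rcases lt_trichotomy x y with h | h | h
      · exact absurd h hlt
      · exact absurd (by simpa using h) (by simpa using heq)
      · exact h
    simp only [pvMerge, if_neg heq, if_neg hlt]
    rw [ih hx (List.Pairwise.sublist (List.sublist_cons_self y ys) hy)]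
    constructor
    · rintro ⟨c, hc1, hc2⟩; exact ⟨c, hc1, List.mem_cons_of_mem _ hc2⟩
    · rintro ⟨c, hc1, hc2⟩
      rcases List.mem_cons.mp hc2 with h | h
      · subst h
        have hxc : x ≤ c := by
          rcases List.mem_cons.mp hc1 with h2 | h2
          · exact le_of_eq h2.symm
          · exact (List.pairwise_cons.mp hx).1 c h2
        exact absurd (lt_of_lt_of_le hyx hxc) (lt_irrefl c)
      · exact ⟨c, hc1, h⟩

-- ===== VERDICT =====
theorem scope_allows_exact_py_spec : Claim_equal_scope_allows_exact_py := by
  intro req alw _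
  unfold Spec_scope_allows_exact_py scope_allows_exact_py_alt
  simp only [pvStep_eq]
  rw [Bool.eq_iff_iff, pvA_char,
    pvMerge_iff _ _ (PySem.List.sorted_pairwise _ _) (PySem.List.sorted_pairwise _ _)]
  constructor
  · rintro ⟨s, hs, hne, hh⟩
    refine ⟨PySem.Str.strip s, ?_, ?_⟩
    · rw [PySem.List.mem_sorted, pvB_mem]
      exact Or.inr ⟨s, hs, rfl, hne⟩
    · rw [PySem.List.mem_sorted, PySem.Set.mem_union]
      rcases hh with h | h
      · exact Or.inr (by simp [h])
      · exact Or.inl ((PySem.Set.mem_ofList _ _).mpr h)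
  · rintro ⟨c, hc1, hc2⟩
    rw [PySem.List.mem_sorted, pvB_mem] at hc1
    rw [PySem.List.mem_sorted, PySem.Set.mem_union] at hc2
    rcases hc1 with h0 | ⟨s, hs, heq, hne⟩
    · simp [PySem.Set.empty] at h0
    · refine ⟨s, hs, heq ▸ hne, ?_⟩
      rcases hc2 with h | h
      · exact Or.inr (heq ▸ (PySem.Set.mem_ofList _ _).mp h)
      · exact Or.inl (heq ▸ (by simpa using h))
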